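-- pv_equiv track=rewrite | github.com/sheshang17/Python-B-to-A- | strings(question).py | removee
-- ===== SOURCE A (Python) =====
-- def removee(s: str) -> str:
--     vo = "aeiouAEIOU"
--     result = " "
--     for char in s:
--         if ("a" <= char <= "z" or "A" <= char <= "Z") and char not in vo:
--             result += "*"
--         else:
--             result += char
--     return result
-- ===== SOURCE B (Python) =====
-- # B: run-based rewriting — scan maximal consonant runs with an index/while loop,
-- # emit '*'*(run length) per run and single chars otherwise, join the pieces once.
-- def removee(s: str) -> str:
--     def is_cons(c):
--         return ("a" <= c <= "z" or "A" <= c <= "Z") and c not in "aeiouAEIOU"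
--     pieces = [" "]
--     i, n = 0, len(s)
--     while i < n:
--         if is_cons(s[i]):
--             j = i
--             while j < n and is_cons(s[j]):
--                 j += 1
--             pieces.append("*" * (j - i))
--             i = j
--         else:
--             pieces.append(s[i])
--             i += 1
--     return "".join(pieces)
-- ===== Notes on version B (the rewrite author's own statement) =====
-- stated objective: alternative
-- what changed: Instead of mapping each character through a branch and concatenating, B scans maximal runs of consonants with a two-index while loop, emits one all-asterisk piece of the run's length per run and single characters elsewhere, and joins the piece list once at the end.
import Mathlib
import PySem

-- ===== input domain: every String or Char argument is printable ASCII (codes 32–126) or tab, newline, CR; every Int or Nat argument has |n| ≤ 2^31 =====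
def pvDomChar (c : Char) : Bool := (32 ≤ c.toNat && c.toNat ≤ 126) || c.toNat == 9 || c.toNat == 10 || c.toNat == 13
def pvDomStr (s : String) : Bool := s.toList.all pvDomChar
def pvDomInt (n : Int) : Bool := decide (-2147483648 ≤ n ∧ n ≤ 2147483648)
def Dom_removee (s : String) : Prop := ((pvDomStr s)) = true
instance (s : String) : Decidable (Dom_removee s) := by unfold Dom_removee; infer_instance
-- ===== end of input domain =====

-- B rewrites maximal consonant runs at once (two-index scan, pieces joined at the end) instead of A's per-character branch with string concatenation; same return value, no speed claim.

-- ===== PORT A =====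
-- for char in s: result += "*" if (letter and not vowel) else char, seeded with " "
def removee (s : String) : String :=
  s.toList.foldl
    (fun result char =>
      if (('a' ≤ char ∧ char ≤ 'z') ∨ ('A' ≤ char ∧ char ≤ 'Z')) ∧
          ¬ (("aeiouAEIOU".toList.contains char) = true)
      then result ++ "*"
      else result ++ String.singleton char)
    " "

-- ===== PORT B =====
-- is_cons(c) from Source B
def pvIsCons (c : Char) : Bool :=
  (('a' ≤ c && c ≤ 'z') || ('A' ≤ c && c ≤ 'Z')) && !("aeiouAEIOU".toList.contains c)

-- the while loop over indices, as structural recursion on the remaining characters: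
-- a consonant head consumes the whole maximal consonant run (inner while j),
-- otherwise one character is emitted and the scan advances by one.
def pvGoB : List Char → List String
  | [] => []
  | c :: rest =>
    if pvIsCons c then
      String.ofList (List.replicate (((c :: rest).takeWhile pvIsCons).length) '*')
        :: pvGoB (rest.dropWhile pvIsCons)
    else
      String.singleton c :: pvGoB rest
termination_by l => l.length
decreasing_by
  · have := List.length_dropWhile_le pvIsCons rest; simp; omega
  · simp

-- return "".join(pieces), pieces seeded with " "
def removee_alt (s : String) : String :=
  String.join (" " :: pvGoB s.toList)

-- ===== PRECONDITION & SPEC =====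
def Spec_removee (s : String) (out : String) : Prop := out = removee_alt s
instance (s : String) (out : String) : Decidable (Spec_removee s out) := by unfold Spec_removee; infer_instance

-- ===== CLAIM (what is proved, stated in full; the proofs are below) =====
def Claim_equal_removee : Prop := ∀ (s : String), Dom_removee s → Spec_removee s (removee s)

-- ===== LEMMAS AND PROOFS =====

def pvStepA (c : Char) : Char :=
  if (('a' ≤ c ∧ c ≤ 'z') ∨ ('A' ≤ c ∧ c ≤ 'Z')) ∧
      ¬ (("aeiouAEIOU".toList.contains c) = true)
  then '*' else c

theorem removee_foldl (l : List Char) (acc : String) :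
    l.foldl
      (fun result char =>
        if (('a' ≤ char ∧ char ≤ 'z') ∨ ('A' ≤ char ∧ char ≤ 'Z')) ∧
            ¬ (("aeiouAEIOU".toList.contains char) = true)
        then result ++ "*"
        else result ++ String.singleton char)
      acc = acc ++ String.ofList (l.map pvStepA) := by
  induction l generalizing acc with
  | nil => simp
  | cons c l ih =>
    simp only [List.foldl, List.map, ih]
    have hstep : (if (('a' ≤ c ∧ c ≤ 'z') ∨ ('A' ≤ c ∧ c ≤ 'Z')) ∧
            ¬ (("aeiouAEIOU".toList.contains c) = true)
        then acc ++ "*" else acc ++ String.singleton c) = acc ++ String.ofList [pvStepA c] := by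
      unfold pvStepA
      split <;> rfl
    rw [hstep, String.append_assoc, ← String.ofList_append]
    rfl

theorem stepA_eq (c : Char) : pvStepA c = if pvIsCons c then '*' else c := by
  unfold pvStepA pvIsCons
  split_ifs with h1 h2 h2 <;> simp_all

theorem join_cons (x : String) (l : List String) :
    String.join (x :: l) = x ++ String.join l := by
  have h : ∀ (l : List String) (a : String),
      l.foldl (fun r s => r ++ s) a = a ++ l.foldl (fun r s => r ++ s) "" := by
    intro l
    induction l with
    | nil => intro a; simp
    | cons y l ih =>
      intro a
      simp only [List.foldl]
      rw [ih (a ++ y), ih (("" : String) ++ y)]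
      simp [String.append_assoc]
  simp only [String.join, List.foldl]
  rw [h (l) (("" : String) ++ x)]
  simp

theorem join_goB (l : List Char) :
    String.join (pvGoB l) = String.ofList (l.map pvStepA) := by
  induction hn : l.length using Nat.strong_induction_on generalizing l with
  | _ n ih =>
  match l with
  | [] => simp [pvGoB, String.join]
  | c :: rest =>
    by_cases hc : pvIsCons c = true
    · rw [pvGoB]
      rw [if_pos hc]
      have htd : (c :: rest) = ((c :: rest).takeWhile pvIsCons) ++ ((c :: rest).dropWhile pvIsCons) :=
        (List.takeWhile_append_dropWhile).symm
      have hdrop : (c :: rest).dropWhile pvIsCons = rest.dropWhile pvIsCons := by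
        simp [List.dropWhile, hc]
      have hlen : (rest.dropWhile pvIsCons).length < n := by
        have := List.length_dropWhile_le pvIsCons rest
        subst hn; simp; omega
      have hrec := ih _ hlen (rest.dropWhile pvIsCons) rfl
      have htake : (((c :: rest).takeWhile pvIsCons).map pvStepA)
          = List.replicate (((c :: rest).takeWhile pvIsCons).length) '*' := by
        rw [← List.length_map (f := pvStepA)]
        apply List.eq_replicate_of_mem
        intro a ha
        obtain ⟨b, hb, rfl⟩ := List.mem_map.mp ha
        have hbc : pvIsCons b = true := List.mem_takeWhile_imp hb
        rw [stepA_eq, if_pos hbc]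
      rw [join_cons, hrec, ← hdrop]
      conv_rhs => rw [htd]
      rw [List.map_append, String.ofList_append, htake]
    · rw [pvGoB]
      rw [if_neg hc]
      have hlen : rest.length < n := by subst hn; simp
      have hrec := ih _ hlen rest rfl
      rw [join_cons, hrec]
      have hstep : pvStepA c = c := by rw [stepA_eq, if_neg (by simp [hc])]
      simp only [List.map, hstep]
      have : String.singleton c = String.ofList [c] := rfl
      rw [this, ← String.ofList_append]
      rfl

-- ===== VERDICT (by name: the statement is the Claim_ definition above) =====
theorem removee_spec : Claim_equal_removee := by
  intro s _
  unfold Spec_removee removee removee_alt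
  rw [removee_foldl, join_cons, join_goB]
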